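-- pv_equiv track=rewrite | github.com/collinrpower/SeeOtter_pre_post | Utilities/utilities.py | loop_iterator
-- ===== SOURCE A (Python) =====
-- def loop_iterator(list, start_index, start_at_next=False, direction=1):
--     """
--     Loop a list starting at a given index.
--     :param list: List of objects
--     :param start_index: Current index to start at
--     :param start_at_next: If true, starts at the next index instead of start_index
--     :param direction: 1 -> Forward; 2-> Backward
--     :return: An iterable loop.
--     """
--     if list is None or len(list) == 0:
--         return None
--     start_index = start_index if not start_at_next else start_index + direction
--     index = start_index
--     if direction == 1:
--         while index < len(list):
--             yield list[index]
--             index += 1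
--         index = 0
--         while index < start_index:
--             yield list[index]
--             index += 1
--     elif direction == -1:
--         while index > -1:
--             yield list[index]
--             index -= 1
--         index = len(list) - 1
--         while index > start_index:
--             yield list[index]
--             index -= 1
-- ===== SOURCE B (Python) =====
-- def loop_iterator(list, start_index, start_at_next=False, direction=1):
--     if list is None or len(list) == 0:
--         return None
--     if start_at_next:
--         start_index += direction
--     if direction == 1 or direction == -1:
--         n = len(list)
--         for i in range(n):
--             yield list[(start_index + i * direction) % n]
-- ===== Notes on version B (the rewrite author's own statement) =====
-- stated objective: simpler
-- what changed: Replaced A's two-phase forward/backward split of four while-loops with a single modular-index pass: for i in range(n) yield list[(start_index + i*direction) % n].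
-- intended difference: On nonempty lists with a negative effective start index (effective start < 0 for direction 1, < -1 for direction -1) A's raw indexing wraps via Python negative indices and yields more than len(list) elements with duplicates, while B yields exactly one clean circular pass of len(list) elements, which is the intended behaviour of a loop iterator. — e.g. on loop_iterator(some [1, 2], -1, false, 1): A returns [2, 1, 2], B returns [2, 1]
import Mathlib
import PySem

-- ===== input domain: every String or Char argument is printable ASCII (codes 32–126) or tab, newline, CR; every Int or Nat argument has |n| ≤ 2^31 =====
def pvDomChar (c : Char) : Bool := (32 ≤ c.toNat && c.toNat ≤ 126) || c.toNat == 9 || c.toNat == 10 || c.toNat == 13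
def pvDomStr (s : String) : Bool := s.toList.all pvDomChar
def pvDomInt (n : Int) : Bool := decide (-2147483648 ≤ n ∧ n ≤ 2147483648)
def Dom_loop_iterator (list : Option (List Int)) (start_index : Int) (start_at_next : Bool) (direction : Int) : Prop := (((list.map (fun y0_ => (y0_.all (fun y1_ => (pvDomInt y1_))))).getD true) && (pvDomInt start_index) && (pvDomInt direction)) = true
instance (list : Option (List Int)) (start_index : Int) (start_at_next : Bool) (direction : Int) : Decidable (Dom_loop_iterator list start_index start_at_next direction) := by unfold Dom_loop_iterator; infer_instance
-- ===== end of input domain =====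

-- B replaces A's two-phase split of four while-loops by a single modular-index pass (objective: simpler).
-- Both versions are Python generators; the List Int on each side is the sequence of yielded values.

-- ===== PORT A =====
-- 'while index < stop: yield list[index]; index += 1'. The Nat fuel is exactly the loop's trip
-- count (stop - index).toNat, added only to make the recursion structural; pyGet? = none is
-- Python's IndexError (A raises there; such inputs are outside Pre_).
def pvUpLoopF : Nat → List Int → Int → Int → List Int
  | 0, _, _, _ => []
  | fuel + 1, xs, index, stop =>
    if index < stop then
      match PySem.List.pyGet? xs index with
      | some v => v :: pvUpLoopF fuel xs (index + 1) stop
      | none => []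
    else []

def pvUpLoop (xs : List Int) (index stop : Int) : List Int :=
  pvUpLoopF (stop - index).toNat xs index stop

-- 'while index > stop: yield list[index]; index -= 1'
def pvDownLoopF : Nat → List Int → Int → Int → List Int
  | 0, _, _, _ => []
  | fuel + 1, xs, index, stop =>
    if stop < index then
      match PySem.List.pyGet? xs index with
      | some v => v :: pvDownLoopF fuel xs (index - 1) stop
      | none => []
    else []

def pvDownLoop (xs : List Int) (index stop : Int) : List Int :=
  pvDownLoopF (index - stop).toNat xs index stop

def loop_iterator (list : Option (List Int)) (start_index : Int) (start_at_next : Bool) (direction : Int) : List Int :=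
  match list with
  | none => []
  | some xs =>
    if xs.length = 0 then []
    else
      let s := if ¬ start_at_next then start_index else start_index + direction
      if direction = 1 then
        pvUpLoop xs s (xs.length : Int) ++ pvUpLoop xs 0 s
      else if direction = -1 then
        pvDownLoop xs s (-1) ++ pvDownLoop xs ((xs.length : Int) - 1) s
      else []

-- ===== PORT B =====
-- single pass: for i in range(n): yield list[(start_index + i*direction) % n]
-- (the index (…) % n is always in [0, n), so the .getD 0 default of the indexing primitive is never used)
def loop_iterator_alt (list : Option (List Int)) (start_index : Int) (start_at_next : Bool) (direction : Int) : List Int :=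
  match list with
  | none => []
  | some xs =>
    if xs.length = 0 then []
    else
      let s := if start_at_next then start_index + direction else start_index
      if direction = 1 ∨ direction = -1 then
        (PySem.List.pyRange 0 (xs.length : Int) 1).map
          (fun i => (PySem.List.pyGet? xs (PySem.Int.mod (s + i * direction) (xs.length : Int))).getD 0)
      else []

-- ===== PRECONDITION & SPEC =====
-- Pre_ excludes exactly the inputs where A raises IndexError: a nonempty list with an effective
-- start index outside [-n, n] for direction 1, or outside [-n-1, n) for direction -1.
def Pre_loop_iterator (list : Option (List Int)) (start_index : Int) (start_at_next : Bool) (direction : Int) : Prop :=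
  let xs := list.getD []
  let n : Int := xs.length
  let s := if start_at_next then start_index + direction else start_index
  xs = [] ∨ ((direction = 1 → -n ≤ s ∧ s ≤ n) ∧ (direction = -1 → -n - 1 ≤ s ∧ s < n))
instance (list : Option (List Int)) (start_index : Int) (start_at_next : Bool) (direction : Int) : Decidable (Pre_loop_iterator list start_index start_at_next direction) := by unfold Pre_loop_iterator; infer_instance
def pvWitness_loop_iterator : Option (List Int) × Int × Bool × Int := (some [1, 2, 3], 1, false, 1)

-- On nonempty lists with a negative effective start index (< 0 for direction 1, < -1 for direction -1)
-- A's raw indexing wraps via Python negative indices and yields more than n elements with duplicates;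
-- B yields exactly one clean circular pass of n elements, the intended behaviour of a loop iterator.
def D_loop_iterator (list : Option (List Int)) (start_index : Int) (start_at_next : Bool) (direction : Int) : Prop :=
  let xs := list.getD []
  let s := if start_at_next then start_index + direction else start_index
  xs ≠ [] ∧ ((direction = 1 ∧ s < 0) ∨ (direction = -1 ∧ s < -1))
instance (list : Option (List Int)) (start_index : Int) (start_at_next : Bool) (direction : Int) : Decidable (D_loop_iterator list start_index start_at_next direction) := by unfold D_loop_iterator; infer_instance

def Spec_loop_iterator (list : Option (List Int)) (start_index : Int) (start_at_next : Bool) (direction : Int) (out : List Int) : Prop := ¬ D_loop_iterator list start_index start_at_next direction → out = loop_iterator_alt list start_index start_at_next direction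
instance (list : Option (List Int)) (start_index : Int) (start_at_next : Bool) (direction : Int) (out : List Int) : Decidable (Spec_loop_iterator list start_index start_at_next direction out) := by unfold Spec_loop_iterator; infer_instance

def pvDiffWitness_loop_iterator : Option (List Int) × Int × Bool × Int := (some [1, 2], -1, false, 1)
def pvDiffWitnessOut_loop_iterator : (List Int) × (List Int) := ([2, 1, 2], [2, 1])

-- ===== CLAIM =====
def Claim_unchanged_loop_iterator : Prop := ∀ (list : Option (List Int)) (start_index : Int) (start_at_next : Bool) (direction : Int), Dom_loop_iterator list start_index start_at_next direction → Pre_loop_iterator list start_index start_at_next direction → Spec_loop_iterator list start_index start_at_next direction (loop_iterator list start_index start_at_next direction)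
def Claim_changed_loop_iterator : Prop := Dom_loop_iterator (pvDiffWitness_loop_iterator.1) (pvDiffWitness_loop_iterator.2.1) (pvDiffWitness_loop_iterator.2.2.1) (pvDiffWitness_loop_iterator.2.2.2) ∧ Pre_loop_iterator (pvDiffWitness_loop_iterator.1) (pvDiffWitness_loop_iterator.2.1) (pvDiffWitness_loop_iterator.2.2.1) (pvDiffWitness_loop_iterator.2.2.2) ∧ D_loop_iterator (pvDiffWitness_loop_iterator.1) (pvDiffWitness_loop_iterator.2.1) (pvDiffWitness_loop_iterator.2.2.1) (pvDiffWitness_loop_iterator.2.2.2) ∧ loop_iterator (pvDiffWitness_loop_iterator.1) (pvDiffWitness_loop_iterator.2.1) (pvDiffWitness_loop_iterator.2.2.1) (pvDiffWitness_loop_iterator.2.2.2) = pvDiffWitnessOut_loop_iterator.1 ∧ loop_iterator_alt (pvDiffWitness_loop_iterator.1) (pvDiffWitness_loop_iterator.2.1) (pvDiffWitness_loop_iterator.2.2.1) (pvDiffWitness_loop_iterator.2.2.2) = pvDiffWitnessOut_loop_iterator.2 ∧ pvDiffWitnessOut_loop_iterator.1 ≠ pvDiffWitnessOut_loop_iterat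or.2
def Claim_exact_loop_iterator : Prop := ∀ (list : Option (List Int)) (start_index : Int) (start_at_next : Bool) (direction : Int), Dom_loop_iterator list start_index start_at_next direction → Pre_loop_iterator list start_index start_at_next direction → D_loop_iterator list start_index start_at_next direction → loop_iterator list start_index start_at_next direction ≠ loop_iterator_alt list start_index start_at_next direction

-- ===== LEMMAS AND PROOFS =====

-- the forward while-loop over valid indices a..b-1 is the segment map
theorem pv_upF_eq : ∀ (m : Nat) (xs : List Int) (a b : Nat), b - a = m → b ≤ xs.length →
    pvUpLoopF m xs (a : Int) (b : Int) = (List.range' a m).map (fun k => xs.getD k 0) := by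
  intro m
  induction m with
  | zero => intro xs a b _ _; simp [pvUpLoopF]
  | succ m ih =>
    intro xs a b hm hb
    have ha : a < b := by omega
    have haxs : a < xs.length := by omega
    rw [pvUpLoopF]
    rw [if_pos (by exact_mod_cast ha)]
    rw [PySem.List.pyGet?_natCast, List.getElem?_eq_getElem haxs]
    have : ((a : Int) + 1) = ((a + 1 : Nat) : Int) := by push_cast; ring
    rw [this, ih xs (a + 1) b (by omega) hb]
    simp [List.range'_succ, List.getD_eq_getElem?_getD, List.getElem?_eq_getElem haxs]

theorem pv_up_eq (xs : List Int) (a b : Nat) (hb : b ≤ xs.length) :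
    pvUpLoop xs (a : Int) (b : Int) = (List.range' a (b - a)).map (fun k => xs.getD k 0) := by
  have : ((b : Int) - (a : Int)).toNat = b - a := by omega
  rw [pvUpLoop, this, pv_upF_eq (b - a) xs a b rfl hb]

-- the backward while-loop from a down to c (stop = c-1) over valid indices is the reversed segment map
theorem pv_downF_eq : ∀ (m : Nat) (xs : List Int) (a : Int) (c : Nat), (a + 1 - c).toNat = m →
    -1 ≤ a → a < (xs.length : Int) →
    pvDownLoopF m xs a ((c : Int) - 1) = ((List.range' c m).map (fun k => xs.getD k 0)).reverse := by
  intro m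
  induction m with
  | zero => intro xs a c _ _ _; simp [pvDownLoopF]
  | succ m ih =>
    intro xs a c hm h1 h2
    have ha : (c : Int) - 1 < a := by omega
    have h0 : 0 ≤ a := by omega
    have haxs : a.toNat < xs.length := by omega
    rw [pvDownLoopF, if_pos ha]
    rw [PySem.List.pyGet?_eq_some_getElem xs h0 h2]
    have hsub : a - 1 + 1 - (c : Int) = a + 1 - c - 1 := by ring
    rw [ih xs (a - 1) c (by omega) (by omega) (by omega)]
    rw [List.range'_1_concat]
    have hcm : c + m = a.toNat := by omega
    simp [hcm, List.getD_eq_getElem?_getD, List.getElem?_eq_getElem haxs]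

theorem pv_down_eq (xs : List Int) (a : Int) (c : Nat) (h1 : -1 ≤ a) (h2 : a < (xs.length : Int)) :
    pvDownLoop xs a ((c : Int) - 1) = ((List.range' c (a + 1 - c).toNat).map (fun k => xs.getD k 0)).reverse := by
  have : (a - ((c : Int) - 1)).toNat = (a + 1 - c).toNat := by omega
  rw [pvDownLoop, this, pv_downF_eq (a + 1 - (c:Int)).toNat xs a c rfl h1 h2]

theorem pv_rev_map_range' {α : Type} (f : Nat → α) (c m : Nat) :
    ((List.range' c m).map f).reverse = (List.range m).map (fun i => f (c + m - 1 - i)) := by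
  apply List.ext_getElem
  · simp
  · intro i h1 h2
    simp only [List.length_map, List.length_reverse, List.length_range'] at h1
    rw [List.getElem_reverse, List.getElem_map, List.getElem_map, List.getElem_range',
      List.getElem_range]
    congr 1
    simp only [List.length_map, List.length_range']
    omega

-- lengths of the loops on in-range (possibly negative, wrapping) indices: the full trip count
theorem pv_upF_len : ∀ (m : Nat) (xs : List Int) (a b : Int), (b - a).toNat = m →
    -(xs.length : Int) ≤ a → b ≤ (xs.length : Int) → (pvUpLoopF m xs a b).length = m := by
  intro m
  induction m with
  | zero => intro xs a b _ _ _; simp [pvUpLoopF]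
  | succ m ih =>
    intro xs a b hm ha hb
    have h : a < b := by omega
    rw [pvUpLoopF, if_pos h]
    have hin : PySem.Raise.InRange xs.length a := by
      constructor <;> omega
    have hs : (PySem.List.pyGet? xs a).isSome := by
      rw [Option.isSome_iff_ne_none]
      intro hn
      exact (PySem.List.pyGet?_eq_none_iff xs a).mp hn hin
    obtain ⟨v, hv⟩ := Option.isSome_iff_exists.mp hs
    rw [hv]
    simp [ih xs (a + 1) b (by omega) (by omega) hb]

theorem pv_downF_len : ∀ (m : Nat) (xs : List Int) (a j : Int), (a - j).toNat = m →
    -(xs.length : Int) - 1 ≤ j → a < (xs.length : Int) → (pvDownLoopF m xs a j).length = m := by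
  intro m
  induction m with
  | zero => intro xs a j _ _ _; simp [pvDownLoopF]
  | succ m ih =>
    intro xs a j hm hj ha
    have h : j < a := by omega
    rw [pvDownLoopF, if_pos h]
    have hin : PySem.Raise.InRange xs.length a := by
      constructor <;> omega
    have hs : (PySem.List.pyGet? xs a).isSome := by
      rw [Option.isSome_iff_ne_none]
      intro hn
      exact (PySem.List.pyGet?_eq_none_iff xs a).mp hn hin
    obtain ⟨v, hv⟩ := Option.isSome_iff_exists.mp hs
    rw [hv]
    simp [ih xs (a - 1) j (by omega) hj (by omega)]

-- emod with a symbolic positive modulus, for indices at most one period away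
theorem pv_emod_eq (X e n : Int) (_hn : 0 < n) (h0 : 0 ≤ e) (he : e < n)
    (hd : X = e ∨ X = e - n ∨ X = e + n) : X % n = e := by
  rcases hd with h | h | h <;> subst h
  · exact Int.emod_eq_of_lt h0 he
  · rw [Int.sub_emod_right]
    exact Int.emod_eq_of_lt h0 he
  · rw [show e + n = e + n * 1 from by ring, Int.add_mul_emod_self_left]
    exact Int.emod_eq_of_lt h0 he

-- one element of B's modular pass, once the modular index is known to be the Nat u
theorem pv_elem (xs : List Int) (X : Int) (u : Nat) (hu : u < xs.length)
    (h : PySem.Int.mod X (xs.length : Int) = (u : Int)) :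
    (PySem.List.pyGet? xs (PySem.Int.mod X (xs.length : Int))).getD 0 = xs.getD u 0 := by
  rw [h, PySem.List.pyGet?_natCast, List.getElem?_eq_getElem hu]
  simp [List.getD_eq_getElem?_getD, List.getElem?_eq_getElem hu]

-- ===== VERDICT =====
-- ===== VERDICT =====
theorem loop_iterator_spec : Claim_unchanged_loop_iterator := by
  intro list si sn d _ hpre hnd
  cases list with
  | none => rfl
  | some xs =>
    by_cases hlen : xs.length = 0
    · simp [loop_iterator, loop_iterator_alt, hlen]
    · unfold Pre_loop_iterator at hpre
      unfold D_loop_iterator at hnd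
      simp only [Option.getD] at hpre hnd
      have hn : 0 < xs.length := Nat.pos_of_ne_zero hlen
      have hxs : xs ≠ [] := by intro h; rw [h] at hlen; exact hlen rfl
      rcases hpre with h | hpre
      · exact absurd h hxs
      simp only [loop_iterator, loop_iterator_alt, if_neg hlen]
      have hsn : (if ¬ sn then si else si + d) = (if sn then si + d else si) := by
        cases sn <;> rfl
      rw [hsn]
      set s := if sn then si + d else si with hs
      set n := xs.length with hnn
      by_cases hd1 : d = 1
      · -- direction 1 : 0 ≤ s ≤ n
        subst hd1
        obtain ⟨hlo, hhi⟩ := hpre.1 rfl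
        have hs0 : 0 ≤ s := by
          by_contra hneg
          exact hnd ⟨hxs, Or.inl ⟨rfl, by omega⟩⟩
        simp only [if_pos]
        set t := s.toNat with ht
        have hst : s = (t : Int) := by omega
        have htn : t ≤ n := by omega
        -- A side
        rw [hst, pv_up_eq xs t n (le_refl n)]
        have e2 : pvUpLoop xs 0 (t : Int) = (List.range' 0 (t - 0)).map (fun k => xs.getD k 0) := by
          have h := pv_up_eq xs 0 t (by omega)
          simpa using h
        rw [e2]
        -- B side
        rw [PySem.List.pyRange_one]
        rw [show (((n:Int)) - 0).toNat = n from by omega]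
        rw [List.map_map]
        rw [show List.range n = List.range (n - t) ++ (List.range t).map (fun x => (n - t) + x)
          from by rw [← List.range_add]; congr 1; omega]
        rw [List.map_append, List.map_map]
        rw [List.range'_eq_map_range, List.map_map, List.range'_eq_map_range, List.map_map]
        congr 1
        · apply List.map_congr_left
          intro i hi
          rw [List.mem_range] at hi
          simp only [Function.comp]
          rw [pv_elem xs _ (t + i) (by omega) (by
            rw [PySem.Int.mod_eq_emod_of_pos (by omega)]
            exact pv_emod_eq _ _ _ (by omega) (by omega) (by push_cast; omega)
              (by push_cast; omega))]
        · apply List.map_congr_left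
          intro i hi
          rw [List.mem_range] at hi
          simp only [Function.comp]
          rw [pv_elem xs _ i (by omega) (by
            rw [PySem.Int.mod_eq_emod_of_pos (by omega)]
            exact pv_emod_eq _ _ _ (by omega) (by omega) (by omega)
              (by push_cast; omega))]
          simp
      · by_cases hdm : d = -1
        · -- direction -1 : -1 ≤ s < n
          subst hdm
          obtain ⟨hlo, hhi⟩ := hpre.2 rfl
          have hsm1 : -1 ≤ s := by
            by_contra hneg
            exact hnd ⟨hxs, Or.inr ⟨rfl, by omega⟩⟩
          simp only [if_neg hd1, if_pos]
          set t := (s + 1).toNat with ht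
          have hst : s = (t : Int) - 1 := by omega
          have htn : t ≤ n := by omega
          -- A side
          rw [show pvDownLoop xs s (-1) = pvDownLoop xs s (((0:Nat):Int) - 1) from by norm_num]
          rw [pv_down_eq xs s 0 hsm1 (by omega)]
          rw [show pvDownLoop xs ((n:Int) - 1) s = pvDownLoop xs ((n:Int) - 1) ((t:Int) - 1)
            from by rw [← hst]]
          rw [pv_down_eq xs ((n:Int) - 1) t (by omega) (by omega)]
          rw [show (s + 1 - (0:Nat)).toNat = t from by omega]
          rw [show ((n:Int) - 1 + 1 - t).toNat = n - t from by omega]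
          rw [pv_rev_map_range', pv_rev_map_range']
          -- B side
          rw [PySem.List.pyRange_one]
          rw [show (((n:Int)) - 0).toNat = n from by omega]
          rw [List.map_map]
          rw [show List.range n = List.range t ++ (List.range (n - t)).map (fun x => t + x)
            from by rw [← List.range_add]; congr 1; omega]
          rw [List.map_append, List.map_map]
          congr 1
          · apply List.map_congr_left
            intro i hi
            rw [List.mem_range] at hi
            simp only [Function.comp]
            rw [pv_elem xs _ (0 + t - 1 - i) (by omega) (by
              rw [PySem.Int.mod_eq_emod_of_pos (by omega)]
              exact pv_emod_eq _ _ _ (by omega) (by omega) (by omega)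
                (by omega))]
          · apply List.map_congr_left
            intro i hi
            rw [List.mem_range] at hi
            simp only [Function.comp]
            rw [pv_elem xs _ (t + (n - t) - 1 - i) (by omega) (by
              rw [PySem.Int.mod_eq_emod_of_pos (by omega)]
              exact pv_emod_eq _ _ _ (by omega) (by omega) (by omega)
                (by push_cast; omega))]
        · -- other directions: both yield nothing
          simp [hd1, hdm]

theorem loop_iterator_changed : Claim_changed_loop_iterator := by unfold Claim_changed_loop_iterator; decide

theorem loop_iterator_tight : Claim_exact_loop_iterator := by
  intro list si sn d _ hpre hD heq
  cases list with
  | none =>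
    unfold D_loop_iterator at hD
    simp at hD
  | some xs =>
    unfold Pre_loop_iterator at hpre
    unfold D_loop_iterator at hD
    simp only [Option.getD] at hpre hD
    obtain ⟨hxs, hD⟩ := hD
    have hlen : xs.length ≠ 0 := by
      intro h
      exact hxs (List.eq_nil_of_length_eq_zero h)
    have hn : 0 < xs.length := Nat.pos_of_ne_zero hlen
    rcases hpre with h | hpre
    · exact hxs h
    have hlena := congrArg List.length heq
    rw [loop_iterator, loop_iterator_alt, if_neg hlen, if_neg hlen] at hlena
    have hsn : (if ¬ sn then si else si + d) = (if sn then si + d else si) := by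
      cases sn <;> rfl
    rw [hsn] at hlena
    set s := if sn then si + d else si with hs
    set n := xs.length with hnn
    -- B's side always has length n
    rcases hD with ⟨hd1, hneg⟩ | ⟨hdm, hneg⟩
    · -- direction 1, s < 0 : A yields n - s > n elements
      subst hd1
      obtain ⟨hlo, _⟩ := hpre.1 rfl
      simp only [if_pos, List.length_append] at hlena
      rw [show pvUpLoop xs 0 s = pvUpLoopF (s - 0).toNat xs 0 s from rfl] at hlena
      rw [show (s - 0).toNat = 0 from by omega] at hlena
      rw [show pvUpLoop xs s (n:Int) = pvUpLoopF ((n:Int) - s).toNat xs s (n:Int) from rfl] at hlena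
      rw [pv_upF_len ((n:Int) - s).toNat xs s (n:Int) rfl (by omega) (by omega)] at hlena
      simp [pvUpLoopF] at hlena
      omega
    · -- direction -1, s < -1 : A yields n - 1 - s > n elements
      subst hdm
      obtain ⟨hlo, _⟩ := hpre.2 rfl
      rw [if_neg (show ¬(-1 : Int) = 1 from by norm_num)] at hlena
      simp only [if_pos, List.length_append] at hlena
      rw [show pvDownLoop xs s (-1) = pvDownLoopF (s - (-1)).toNat xs s (-1) from rfl] at hlena
      rw [show (s - (-1)).toNat = 0 from by omega] at hlena
      rw [show pvDownLoop xs ((n:Int) - 1) s = pvDownLoopF ((n:Int) - 1 - s).toNat xs ((n:Int) - 1) s from rfl] at hlena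
      rw [pv_downF_len ((n:Int) - 1 - s).toNat xs ((n:Int) - 1) s rfl (by omega) (by omega)] at hlena
      simp [pvDownLoopF] at hlena
      omega
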